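-- pv_equiv track=rewrite | github.com/kapiliitr/concurrency | codejam2020/indicium2.py | getsimpleway
-- ===== SOURCE A (Python) =====
-- import collections
--
-- def getsimpleway(n, k):
--     arr = collections.Counter()
--     q = k // n
--     r = k % n
--     for i in range(n):
--         if r:
--             arr[q+1] += 1
--             r -= 1
--         else:
--             arr[q] += 1
--     return arr
-- ===== SOURCE B (Python) =====
-- import collections
--
-- # B: closed-form O(1) arithmetic instead of A's O(n) counting loop; empty Counter for n <= 0.
-- def getsimpleway(n, k):
--     if n <= 0:
--         return collections.Counter()
--     q, r = divmod(k, n)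
--     if r:
--         return collections.Counter({q + 1: r, q: n - r})
--     return collections.Counter({q: n})
-- ===== Notes on version B (the rewrite author's own statement) =====
-- stated objective: faster
-- what changed: Replaces A's O(n) counting loop with a closed-form: divmod gives quotient q and remainder r, and the Counter is built directly as {q+1: r, q: n-r} (or {q: n} when r == 0).
import Mathlib
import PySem

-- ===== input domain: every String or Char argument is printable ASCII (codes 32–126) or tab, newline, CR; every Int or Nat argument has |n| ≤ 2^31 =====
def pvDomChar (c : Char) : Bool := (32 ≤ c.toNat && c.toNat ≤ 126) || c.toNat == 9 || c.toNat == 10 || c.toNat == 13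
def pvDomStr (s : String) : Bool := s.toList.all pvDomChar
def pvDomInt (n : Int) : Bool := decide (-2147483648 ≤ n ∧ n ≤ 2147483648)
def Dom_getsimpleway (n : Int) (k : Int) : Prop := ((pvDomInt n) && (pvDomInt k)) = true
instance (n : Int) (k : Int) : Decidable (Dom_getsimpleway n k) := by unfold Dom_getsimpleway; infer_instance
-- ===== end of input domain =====

-- B replaces A's O(n) counting loop by the closed form {q+1: r, q: n-r} from divmod(k, n).

-- ===== PORT A =====
-- the loop body: Counter bump arr[q+1] += 1 / arr[q] += 1 guarded by `if r:`
def pvStepA (q : Int) (st : PySem.Dict Int Int × Int) (_i : Int) : PySem.Dict Int Int × Int :=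
  if st.2 ≠ 0 then (st.1.modify (q + 1) 0 (· + 1), st.2 - 1)
  else (st.1.modify q 0 (· + 1), st.2)

def getsimpleway (n : Int) (k : Int) : List (Int × Int) :=
  let q := PySem.Int.floordiv k n
  let r := PySem.Int.mod k n
  let st := (PySem.List.pyRange 0 n 1).foldl (pvStepA q) (PySem.Dict.empty, r)
  st.1.items

-- ===== PORT B =====
def getsimpleway_alt (n : Int) (k : Int) : List (Int × Int) :=
  if n ≤ 0 then []
  else
    let q := PySem.Int.floordiv k n
    let r := PySem.Int.mod k n
    if r ≠ 0 then [(q + 1, r), (q, n - r)] else [(q, n)]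

-- ===== PRECONDITION & SPEC =====
-- Pre_ excludes exactly n = 0, where A raises ZeroDivisionError on k // n.
def Pre_getsimpleway (n : Int) (k : Int) : Prop := n ≠ 0
instance (n : Int) (k : Int) : Decidable (Pre_getsimpleway n k) := by unfold Pre_getsimpleway; infer_instance
def pvWitness_getsimpleway : Int × Int := (3, 7)

def Spec_getsimpleway (n : Int) (k : Int) (out : List (Int × Int)) : Prop := out = getsimpleway_alt n k
instance (n : Int) (k : Int) (out : List (Int × Int)) : Decidable (Spec_getsimpleway n k out) := by unfold Spec_getsimpleway; infer_instance

-- ===== CLAIM (what is proved, stated in full; the proofs are below) =====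
def Claim_equal_getsimpleway : Prop := ∀ (n : Int) (k : Int), Dom_getsimpleway n k → Pre_getsimpleway n k → Spec_getsimpleway n k (getsimpleway n k)

-- ===== LEMMAS AND PROOFS =====

-- A fold whose body ignores the list elements is an iterate of the step on the state.
theorem foldl_const_iterate {σ : Type} (g : σ → σ) (l : List Int) (s : σ) :
    l.foldl (fun s _ => g s) s = g^[l.length] s := by
  induction l generalizing s with
  | nil => rfl
  | cons x xs ih => simp [List.foldl, ih, Function.iterate_succ_apply]

theorem stepA_pos (q : Int) (c r0 : Int) (h : r0 ≠ 0) :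
    pvStepA q (PySem.Dict.mk [(q + 1, c)], r0) 0 = (PySem.Dict.mk [(q + 1, c + 1)], r0 - 1) := by
  simp [pvStepA, h, PySem.Dict.modify, PySem.Dict.insert, PySem.Dict.getD, PySem.Dict.get?,
    PySem.Dict.contains]

-- Phase 1: while the remainder component stays positive, each step bumps the q+1 count.
theorem phase1 (q : Int) : ∀ (m : Nat) (c r0 : Int), (m : Int) ≤ r0 →
    (fun st => pvStepA q st 0)^[m] (PySem.Dict.mk [(q + 1, c)], r0) =
      (PySem.Dict.mk [(q + 1, c + m)], r0 - m) := by
  intro m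
  induction m with
  | zero => intro c r0 _; simp
  | succ m ih =>
    intro c r0 h
    rw [Function.iterate_succ_apply]
    have hr : r0 ≠ 0 := by omega
    simp only [stepA_pos q c r0 hr]
    rw [ih (c + 1) (r0 - 1) (by push_cast at h ⊢; omega)]
    have e1 : c + 1 + (m : Int) = c + ((m + 1 : Nat) : Int) := by push_cast; ring
    have e2 : r0 - 1 - (m : Int) = r0 - ((m + 1 : Nat) : Int) := by push_cast; ring
    rw [e1, e2]

-- Phase 2: remainder 0, each step bumps the q count (second entry).
theorem phase2 (q : Int) : ∀ (m : Nat) (c d : Int),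
    (fun st => pvStepA q st 0)^[m] (PySem.Dict.mk [(q + 1, c), (q, d)], 0) =
      (PySem.Dict.mk [(q + 1, c), (q, d + m)], 0) := by
  intro m
  induction m with
  | zero => intro c d; simp
  | succ m ih =>
    intro c d
    rw [Function.iterate_succ_apply]
    have hstep : pvStepA q (PySem.Dict.mk [(q + 1, c), (q, d)], 0) 0 =
        (PySem.Dict.mk [(q + 1, c), (q, d + 1)], 0) := by
      simp [pvStepA, PySem.Dict.modify, PySem.Dict.insert, PySem.Dict.getD, PySem.Dict.get?,
        PySem.Dict.contains]
    rw [hstep, ih]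
    have e1 : d + 1 + (m : Int) = d + ((m + 1 : Nat) : Int) := by push_cast; ring
    rw [e1]

-- Phase 2 with no q+1 entry (r = 0 from the start).
theorem phase2' (q : Int) : ∀ (m : Nat) (d : Int),
    (fun st => pvStepA q st 0)^[m] (PySem.Dict.mk [(q, d)], 0) =
      (PySem.Dict.mk [(q, d + m)], 0) := by
  intro m
  induction m with
  | zero => intro d; simp
  | succ m ih =>
    intro d
    rw [Function.iterate_succ_apply]
    have hstep : pvStepA q (PySem.Dict.mk [(q, d)], 0) 0 = (PySem.Dict.mk [(q, d + 1)], 0) := by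
      simp [pvStepA, PySem.Dict.modify, PySem.Dict.insert, PySem.Dict.getD, PySem.Dict.get?,
        PySem.Dict.contains]
    rw [hstep, ih]
    have e1 : d + 1 + (m : Int) = d + ((m + 1 : Nat) : Int) := by push_cast; ring
    rw [e1]

theorem stepA_from_empty (q : Int) (r0 : Int) :
    pvStepA q ((PySem.Dict.empty : PySem.Dict Int Int), r0) 0 =
      if r0 ≠ 0 then (PySem.Dict.mk [(q + 1, 1)], r0 - 1) else (PySem.Dict.mk [(q, 1)], r0) := by
  by_cases h : r0 = 0 <;>
    simp [pvStepA, h, PySem.Dict.modify, PySem.Dict.insert, PySem.Dict.getD, PySem.Dict.get?,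
      PySem.Dict.contains, PySem.Dict.empty]

theorem getsimpleway_spec : Claim_equal_getsimpleway := by
  intro n k _ hpre
  unfold Spec_getsimpleway getsimpleway getsimpleway_alt
  by_cases hn : n ≤ 0
  · -- n < 0: the loop body never runs, both sides are the empty Counter
    rw [PySem.List.pyRange_one_eq_nil (by omega)]
    simp [hn, PySem.Dict.empty]
  · rw [not_le] at hn
    simp only [if_neg (by omega : ¬ n ≤ 0)]
    set q := PySem.Int.floordiv k n with hq
    set r := PySem.Int.mod k n with hr
    have hr0 : 0 ≤ r := PySem.Int.mod_nonneg k hn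
    have hrn : r < n := PySem.Int.mod_lt k hn
    have hlen : (PySem.List.pyRange 0 n 1).length = n.toNat := by
      rw [PySem.List.length_pyRange_one]; omega
    have hfold : (PySem.List.pyRange 0 n 1).foldl (pvStepA q) (PySem.Dict.empty, r) =
        (fun st => pvStepA q st 0)^[n.toNat] (PySem.Dict.empty, r) := by
      have : (PySem.List.pyRange 0 n 1).foldl (pvStepA q) (PySem.Dict.empty, r) =
          (PySem.List.pyRange 0 n 1).foldl
            (fun (st : PySem.Dict Int Int × Int) (_ : Int) => pvStepA q st 0)
            (PySem.Dict.empty, r) := by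
        apply PySem.List.foldl_congr_mem
        intro st x _; simp [pvStepA]
      rw [this, foldl_const_iterate, hlen]
    rw [hfold]
    by_cases hrz : r = 0
    · -- no remainder: n bumps of key q
      have hn1 : n.toNat = (n.toNat - 1) + 1 := by omega
      rw [hn1, Function.iterate_succ_apply]
      have h1 : pvStepA q ((PySem.Dict.empty : PySem.Dict Int Int), r) 0 =
          (PySem.Dict.mk [(q, 1)], r) := by rw [stepA_from_empty]; simp [hrz]
      simp only [hrz] at h1 ⊢
      rw [h1, phase2' q (n.toNat - 1) 1]
      have e : (1 : Int) + ((n.toNat - 1 : Nat) : Int) = n := by omega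
      rw [e]
      simp
    · -- r bumps of key q+1, then n - r bumps of key q
      have hsplit : n.toNat = (n.toNat - r.toNat) + r.toNat := by omega
      rw [hsplit, Function.iterate_add_apply]
      -- first r iterations
      have hr1 : r.toNat = (r.toNat - 1) + 1 := by omega
      have hA : (fun st => pvStepA q st 0)^[r.toNat] ((PySem.Dict.empty : PySem.Dict Int Int), r) =
          (PySem.Dict.mk [(q + 1, r)], 0) := by
        rw [hr1, Function.iterate_succ_apply]
        have h1 : pvStepA q ((PySem.Dict.empty : PySem.Dict Int Int), r) 0 =
            (PySem.Dict.mk [(q + 1, 1)], r - 1) := by rw [stepA_from_empty]; simp [hrz]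
        rw [h1, phase1 q (r.toNat - 1) 1 (r - 1) (by omega)]
        have e1 : 1 + ((r.toNat - 1 : Nat) : Int) = r := by omega
        have e2 : r - 1 - ((r.toNat - 1 : Nat) : Int) = 0 := by omega
        rw [e1, e2]
      rw [hA]
      -- remaining n - r iterations
      have hm1 : n.toNat - r.toNat = (n.toNat - r.toNat - 1) + 1 := by omega
      rw [hm1, Function.iterate_succ_apply]
      have h2 : pvStepA q (PySem.Dict.mk [(q + 1, r)], 0) 0 =
          (PySem.Dict.mk [(q + 1, r), (q, 1)], 0) := by
        simp [pvStepA, PySem.Dict.modify, PySem.Dict.insert, PySem.Dict.getD, PySem.Dict.get?,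
          PySem.Dict.contains]
      rw [h2, phase2 q (n.toNat - r.toNat - 1) r 1]
      have e3 : 1 + ((n.toNat - r.toNat - 1 : Nat) : Int) = n - r := by omega
      rw [e3]
      simp [hrz]
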